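-- pv_equiv track=rewrite | github.com/icefoxtail/AP------ | js_compat_check.py | mask_comments_keep_strings
-- ===== SOURCE A (Python) =====
-- def mask_comments_keep_strings(src: str) -> str:
--     """
--     주석만 공백으로 마스킹.
--     문자열 내용은 유지.
--     """
--     out = []
--     i = 0
--     n = len(src)
--     state = "code"
--     quote = ""
--     while i < n:
--         ch = src[i]
--         nxt = src[i + 1] if i + 1 < n else ""
--
--         if state == "code":
--             if ch == "/" and nxt == "/":
--                 out.append(" ")
--                 out.append(" ")
--                 i += 2
--                 state = "line_comment"
--             elif ch == "/" and nxt == "*":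
--                 out.append(" ")
--                 out.append(" ")
--                 i += 2
--                 state = "block_comment"
--             elif ch in ("'", '"', "`"):
--                 quote = ch
--                 out.append(ch)
--                 i += 1
--                 state = "string"
--             else:
--                 out.append(ch)
--                 i += 1
--
--         elif state == "line_comment":
--             if ch == "\n":
--                 out.append("\n")
--                 i += 1
--                 state = "code"
--             else:
--                 out.append(" ")
--                 i += 1
--
--         elif state == "block_comment":
--             if ch == "*" and nxt == "/":
--                 out.append(" ")
--                 out.append(" ")
--                 i += 2
--                 state = "code"
--             else:
--                 out.append("\n" if ch == "\n" else " ")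
--                 i += 1
--
--         elif state == "string":
--             out.append(ch)
--             if ch == "\\":
--                 if i + 1 < n:
--                     out.append(src[i + 1])
--                     i += 2
--                 else:
--                     i += 1
--             elif ch == quote:
--                 i += 1
--                 state = "code"
--             else:
--                 i += 1
--
--     return "".join(out)
-- ===== SOURCE B (Python) =====
-- def mask_comments_keep_strings(src: str) -> str:
--     """Token-span scanner: jump over whole comments/strings with find-style scans
--     instead of a char-by-char state machine."""
--     n = len(src)
--     parts = []
--     i = 0
--     while i < n:
--         ch = src[i]
--         if ch == "/" and src.startswith("//", i):
--             j = src.find("\n", i + 2)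
--             end = n if j < 0 else j          # newline itself stays code
--             parts.append(" " * (end - i))
--             i = end
--         elif ch == "/" and src.startswith("/*", i):
--             j = src.find("*/", i + 2)
--             end = n if j < 0 else j + 2      # mask opener, body and closer
--             seg = src[i:end]
--             parts.append("".join("\n" if c == "\n" else " " for c in seg))
--             i = end
--         elif ch in "'\"`":
--             j = i + 1
--             while j < n:
--                 c = src[j]
--                 if c == "\\":
--                     j += 2                   # skip escaped char
--                 elif c == ch:
--                     j += 1
--                     break
--                 else:
--                     j += 1
--             parts.append(src[i:min(j, n)])   # string kept verbatim
--             i = j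
--         else:
--             j = i + 1                        # plain code: copy run up to next special char
--             while j < n and src[j] not in "'\"`/":
--                 j += 1
--             parts.append(src[i:j])
--             i = j
--     return "".join(parts)
-- ===== Notes on version B (the rewrite author's own statement) =====
-- stated objective: faster
-- what changed: Replaces A's char-by-char four-state FSM with a token-span scanner that jumps over whole line/block comments, string literals and plain-code runs per outer step (find-to-newline, find-'*/', escape-aware string scan), masking or copying each span at once.
import Mathlib
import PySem

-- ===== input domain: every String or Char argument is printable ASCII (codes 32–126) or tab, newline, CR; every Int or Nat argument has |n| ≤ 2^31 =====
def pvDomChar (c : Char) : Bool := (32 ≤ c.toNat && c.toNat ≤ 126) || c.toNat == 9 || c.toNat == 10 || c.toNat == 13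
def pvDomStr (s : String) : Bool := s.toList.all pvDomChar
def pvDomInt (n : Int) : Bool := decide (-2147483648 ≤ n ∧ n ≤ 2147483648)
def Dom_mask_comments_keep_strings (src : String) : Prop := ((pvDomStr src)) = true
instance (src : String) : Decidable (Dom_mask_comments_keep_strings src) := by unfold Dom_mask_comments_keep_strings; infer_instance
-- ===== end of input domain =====

-- B replaces A's char-by-char four-state FSM with a token-span scanner (jump over whole
-- comments/strings/plain runs per outer step); same exact output, measurably faster (bulk
-- C-level str.find/slice spans instead of a per-character Python loop).

-- ===== PORT A =====
-- the four values of A's `state` variable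
inductive MSt | code | line | block | strSt
deriving DecidableEq, Repr

def pvIsQuote (c : Char) : Bool := c = '\'' || c = '"' || c = '`'

-- A's while loop: state + quote + remaining input (src[i:]); branches in Python's order
def maskA_go : MSt → Char → List Char → List Char
  | _, _, [] => []
  | .code, q, '/'::'/'::r => ' ' :: ' ' :: maskA_go .line q r
  | .code, q, '/'::'*'::r => ' ' :: ' ' :: maskA_go .block q r
  | .code, q, c::r => if pvIsQuote c then c :: maskA_go .strSt c r else c :: maskA_go .code q r
  | .line, q, c::r => if c = '\n' then '\n' :: maskA_go .code q r else ' ' :: maskA_go .line q r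
  | .block, q, '*'::'/'::r => ' ' :: ' ' :: maskA_go .code q r
  | .block, q, c::r => (if c = '\n' then '\n' else ' ') :: maskA_go .block q r
  | .strSt, q, '\\'::c::r => '\\' :: c :: maskA_go .strSt q r
  | .strSt, _, ['\\'] => ['\\']
  | .strSt, q, c::r => if c = q then c :: maskA_go .code q r else c :: maskA_go .strSt q r

-- Python's quote = "" initially; it is only read after being set, so any initial Char is equivalent
def mask_comments_keep_strings (src : String) : String :=
  String.ofList (maskA_go .code ' ' src.toList)

-- ===== PORT B =====
def pvIsSpecial (c : Char) : Bool := c = '/' || pvIsQuote c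

-- port of `src.find("*/", i+2)` plus the slicing around it: chars strictly before the
-- first "*/", and the rest after it (none = not found)
def findStarSlash : List Char → Option (List Char × List Char)
  | [] => none
  | '*'::'/'::r => some ([], r)
  | c::r => (findStarSlash r).map (fun p => (c :: p.1, p.2))

-- port of B's inner `while` scanning past a string body (escape skips two chars):
-- (src[i+1:min(j,n)], src[j:])
def takeStr (q : Char) : List Char → List Char × List Char
  | [] => ([], [])
  | ['\\'] => (['\\'], [])
  | '\\'::c::r => let p := takeStr q r; ('\\'::c::p.1, p.2)
  | c::r => if c = q then ([c], r) else let p := takeStr q r; (c::p.1, p.2)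

-- masking of a block-comment segment: '\n' kept, everything else → ' '
def maskBlockSeg (l : List Char) : List Char :=
  l.map (fun c => if c = '\n' then '\n' else ' ')

theorem findStarSlash_len {l : List Char} {p : List Char × List Char}
    (h : findStarSlash l = some p) : p.2.length < l.length := by
  induction l using findStarSlash.induct generalizing p with
  | case1 => simp [findStarSlash] at h
  | case2 r => simp [findStarSlash] at h; subst h; simp
  | case3 c r hne ih =>
      rw [findStarSlash] at h
      · cases hfs : findStarSlash r with
        | none => rw [hfs] at h; simp at h
        | some p' =>
            rw [hfs] at h; simp at h
            have := ih hfs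
            subst h; simpa using Nat.lt_succ_of_lt this
      · exact hne

theorem takeStr_len (q : Char) (l : List Char) : (takeStr q l).2.length ≤ l.length := by
  induction l using takeStr.induct q with
  | case1 => simp [takeStr]
  | case2 => simp [takeStr]
  | case3 c r ih => simp only [takeStr]; simp; omega
  | case4 r h1 h2 =>
      rw [takeStr]
      · simp
      · exact h1
      · exact h2
  | case5 c r h1 h2 hne ih =>
      rw [takeStr]
      · simp only [if_neg hne]; simp; omega
      · exact h1
      · exact h2

-- B's outer while loop: one whole token (comment / string / plain run) per step;
-- `find`+slice pairs are ported as takeWhile/dropWhile with the same predicate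
def maskB_go : List Char → List Char
  | [] => []
  | '/'::'/'::r =>
      ' ' :: ' ' :: ((r.takeWhile (fun c => c ≠ '\n')).map (fun _ => ' ')
        ++ maskB_go (r.dropWhile (fun c => c ≠ '\n')))
  | '/'::'*'::r =>
      match h : findStarSlash r with
      | none => ' ' :: ' ' :: maskBlockSeg r
      | some p => ' ' :: ' ' :: (maskBlockSeg p.1 ++ ' ' :: ' ' :: maskB_go p.2)
  | c::r =>
      if pvIsQuote c then
        let p := takeStr c r
        c :: (p.1 ++ maskB_go p.2)
      else
        c :: ((r.takeWhile (fun x => ¬ pvIsSpecial x))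
          ++ maskB_go (r.dropWhile (fun x => ¬ pvIsSpecial x)))
termination_by l => l.length
decreasing_by
  · have := List.length_dropWhile_le (p := fun c => decide (c ≠ '\n')) (l := r)
    simp at this ⊢; omega
  · exact Nat.lt_succ_of_lt (Nat.lt_succ_of_lt (findStarSlash_len h))
  · have := takeStr_len c r; simp; omega
  · have := List.length_dropWhile_le (p := fun x => !pvIsSpecial x) (l := r)
    simp at this ⊢; omega

def mask_comments_keep_strings_alt (src : String) : String :=
  String.ofList (maskB_go src.toList)

-- ===== PRECONDITION & SPEC =====
def Spec_mask_comments_keep_strings (src : String) (out : String) : Prop := out = mask_comments_keep_strings_alt src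
instance (src : String) (out : String) : Decidable (Spec_mask_comments_keep_strings src out) := by unfold Spec_mask_comments_keep_strings; infer_instance

-- ===== CLAIM (what is proved, stated in full; the proofs are below) =====
def Claim_equal_mask_comments_keep_strings : Prop := ∀ (src : String), Dom_mask_comments_keep_strings src → Spec_mask_comments_keep_strings src (mask_comments_keep_strings src)

-- ===== LEMMAS AND PROOFS =====

-- equation lemmas for maskA_go with the overlap side-conditions discharged explicitly
theorem maskA_line_cons (q c : Char) (r : List Char) :
    maskA_go .line q (c::r)
      = if c = '\n' then '\n' :: maskA_go .code q r else ' ' :: maskA_go .line q r := by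
  rw [maskA_go]

theorem maskA_block_cons (q c : Char) (r : List Char) (h : ∀ r', c = '*' → r = '/'::r' → False) :
    maskA_go .block q (c::r) = (if c = '\n' then '\n' else ' ') :: maskA_go .block q r := by
  rw [maskA_go]
  · exact h

theorem maskA_code_cons (q c : Char) (r : List Char)
    (h1 : ∀ r', c = '/' → r = '/'::r' → False) (h2 : ∀ r', c = '/' → r = '*'::r' → False) :
    maskA_go .code q (c::r)
      = if pvIsQuote c then c :: maskA_go .strSt c r else c :: maskA_go .code q r := by
  rw [maskA_go]
  · exact h1
  · exact h2

theorem maskA_str_cons (q c : Char) (r : List Char) (hb : c ≠ '\\') :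
    maskA_go .strSt q (c::r)
      = if c = q then c :: maskA_go .code q r else c :: maskA_go .strSt q r := by
  rw [maskA_go]
  · intro _ _ hc _; exact hb hc
  · intro hc _; exact hb hc

theorem maskA_code_plain (q c : Char) (r : List Char) (hs : c ≠ '/') (hq : pvIsQuote c = false) :
    maskA_go .code q (c::r) = c :: maskA_go .code q r := by
  rw [maskA_code_cons q c r (fun _ hc _ => hs hc) (fun _ hc _ => hs hc), hq]
  simp

theorem maskA_code_quote (q c : Char) (r : List Char) (hq : pvIsQuote c = true) :
    maskA_go .code q (c::r) = c :: maskA_go .strSt c r := by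
  have hs : c ≠ '/' := by
    intro h; subst h; simp [pvIsQuote] at hq
  rw [maskA_code_cons q c r (fun _ hc _ => hs hc) (fun _ hc _ => hs hc), hq]
  simp

-- A in line_comment state = mask up to the newline, then back to code (the newline is code's to copy)
theorem lineLemma (q : Char) (l : List Char) :
    maskA_go .line q l =
      (l.takeWhile (fun c => c ≠ '\n')).map (fun _ => ' ')
        ++ maskA_go .code q (l.dropWhile (fun c => c ≠ '\n')) := by
  induction l with
  | nil => simp [maskA_go]
  | cons c r ih =>
      rw [maskA_line_cons]
      by_cases h : c = '\n'
      · subst h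
        have hc := maskA_code_plain q '\n' r (by decide) (by decide)
        simp [List.takeWhile, List.dropWhile, hc]
      · simp [List.takeWhile, List.dropWhile, h, ih]

-- A in block_comment state = mask up to and including "*/", then back to code
theorem blockLemma (q : Char) (l : List Char) :
    maskA_go .block q l =
      (match findStarSlash l with
       | none => maskBlockSeg l
       | some p => maskBlockSeg p.1 ++ ' ' :: ' ' :: maskA_go .code q p.2) := by
  induction l using findStarSlash.induct with
  | case1 => simp [maskA_go, findStarSlash, maskBlockSeg]
  | case2 r => simp [maskA_go, findStarSlash, maskBlockSeg]
  | case3 c r hne ih =>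
      rw [findStarSlash]
      · rw [maskA_block_cons q c r hne, ih]
        cases hfs : findStarSlash r with
        | none => simp [maskBlockSeg]
        | some p => simp [maskBlockSeg]
      · exact hne

-- A in string state = copy the string token verbatim, then back to code
theorem strLemma (q : Char) (l : List Char) :
    maskA_go .strSt q l = (takeStr q l).1 ++ maskA_go .code q ((takeStr q l).2) := by
  induction l using takeStr.induct q with
  | case1 => simp [maskA_go, takeStr]
  | case2 => simp [maskA_go, takeStr]
  | case3 c r ih => simp only [maskA_go, takeStr]; simpa using ih
  | case4 r h1 h2 =>
      have hq : q ≠ '\\' := by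
        intro hb; cases r with
        | nil => exact h1 hb rfl
        | cons d r' => exact h2 d r' hb rfl
      rw [maskA_str_cons q q r hq, takeStr]
      · simp
      · exact h1
      · exact h2
  | case5 c r h1 h2 hne ih =>
      have hb : c ≠ '\\' := by
        intro hb; cases r with
        | nil => exact h1 hb rfl
        | cons d r' => exact h2 d r' hb rfl
      rw [maskA_str_cons q c r hb, takeStr]
      · simp only [if_neg hne]; simpa using ih
      · exact h1
      · exact h2

-- A in code state copies a run of non-special characters verbatim
theorem codeRunLemma (q : Char) (l : List Char) :
    maskA_go .code q l =
      (l.takeWhile (fun x => ¬ pvIsSpecial x))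
        ++ maskA_go .code q (l.dropWhile (fun x => ¬ pvIsSpecial x)) := by
  induction l with
  | nil => simp [maskA_go]
  | cons c r ih =>
      by_cases h : pvIsSpecial c
      · simp [List.takeWhile, List.dropWhile, h]
      · have hq : pvIsQuote c = false := by
          simp [pvIsSpecial] at h; simp [h.2]
        have hs : c ≠ '/' := by simp [pvIsSpecial] at h; exact h.1
        rw [maskA_code_plain q c r hs hq]
        simp [List.takeWhile, List.dropWhile, h, ih]

-- non-dependent unfolding of maskB_go's block-comment branch
theorem maskB_go_blockEq (r : List Char) :
    maskB_go ('/'::'*'::r)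
      = (match findStarSlash r with
         | none => ' ' :: ' ' :: maskBlockSeg r
         | some p => ' ' :: ' ' :: (maskBlockSeg p.1 ++ ' ' :: ' ' :: maskB_go p.2)) := by
  rw [maskB_go]
  split <;> rename_i h' <;> rw [h']

theorem mainLemma (l : List Char) : ∀ q, maskA_go .code q l = maskB_go l := by
  induction l using maskB_go.induct with
  | case1 => intro q; simp [maskA_go, maskB_go]
  | case2 r ih =>
      intro q
      rw [maskB_go]
      simp only [maskA_go, lineLemma, ih q]
  | case3 r hfs =>
      intro q
      rw [maskB_go_blockEq, hfs]
      simp only [maskA_go, blockLemma, hfs]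
  | case4 r p hfs ih =>
      intro q
      rw [maskB_go_blockEq, hfs]
      simp only [maskA_go, blockLemma, hfs, ih q]
  | case5 c r h1 h2 hq p ih =>
      intro q
      rw [maskB_go]
      · rw [maskA_code_quote q c r hq, strLemma]
        simp only [hq, if_true]
        exact congrArg (fun t => c :: ((takeStr c r).1 ++ t)) (ih c)
      · exact h1
      · exact h2
  | case6 c r h1 h2 hq ih =>
      intro q
      rw [maskB_go]
      · have hA : maskA_go .code q (c::r) = c :: maskA_go .code q r := by
          rw [maskA_code_cons q c r h1 h2]
          simp [eq_false_of_ne_true hq]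
        rw [hA, codeRunLemma, ih q]
        simp [eq_false_of_ne_true hq]
      · exact h1
      · exact h2

-- ===== VERDICT (by name: the statement is the Claim_ definition above) =====
theorem mask_comments_keep_strings_spec : Claim_equal_mask_comments_keep_strings := by
  intro src _
  unfold Spec_mask_comments_keep_strings mask_comments_keep_strings mask_comments_keep_strings_alt
  rw [mainLemma]
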